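-- pv_equiv track=rewrite | github.com/Fxy2021201516/UNG_new | data/generate_base_label.py | count_descendants
-- ===== SOURCE A (Python) =====
-- from collections import defaultdict, deque
--
-- def count_descendants(graph, node):
--     """计算单个节点的所有后代节点数量"""
--     visited = set()
--     queue = deque([node])
--     count = 0
--
--     while queue:
--         current = queue.popleft()
--         for neighbor in graph[current]:
--             if neighbor not in visited:
--                 visited.add(neighbor)
--                 queue.append(neighbor)
--                 count += 1
--     return count
-- ===== SOURCE B (Python) =====
-- def count_descendants(graph, node):
--     """计算单个节点的所有后代节点数量"""
--     reachable = set(graph[node])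
--     changed = True
--     while changed:
--         changed = False
--         for x in list(reachable):
--             for nb in graph[x]:
--                 if nb not in reachable:
--                     reachable.add(nb)
--                     changed = True
--     return len(reachable)
-- ===== Notes on version B (the rewrite author's own statement) =====
-- stated objective: alternative
-- what changed: Replaces A's worklist BFS (FIFO queue, per-neighbor counter) by a saturation/fixed-point algorithm: start from graph[node] and repeatedly sweep the whole current reachable set, adding neighbours, until a full pass adds nothing, then return the set's size; no queue and no counter exist in B.
import Mathlib
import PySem

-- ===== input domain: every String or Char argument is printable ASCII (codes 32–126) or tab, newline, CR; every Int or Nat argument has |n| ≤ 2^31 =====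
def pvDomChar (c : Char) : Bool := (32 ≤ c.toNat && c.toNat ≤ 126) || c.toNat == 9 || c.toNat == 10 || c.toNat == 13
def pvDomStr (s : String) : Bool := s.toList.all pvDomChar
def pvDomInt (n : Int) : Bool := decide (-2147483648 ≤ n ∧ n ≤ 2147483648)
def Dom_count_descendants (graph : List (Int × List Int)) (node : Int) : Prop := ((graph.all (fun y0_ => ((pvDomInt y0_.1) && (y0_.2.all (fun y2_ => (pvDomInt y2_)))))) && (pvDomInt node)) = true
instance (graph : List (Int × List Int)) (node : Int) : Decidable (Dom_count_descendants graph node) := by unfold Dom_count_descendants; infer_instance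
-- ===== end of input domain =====

-- B replaces A's worklist BFS (FIFO queue, per-neighbour counter) by a saturation/fixed-point
-- algorithm: start from graph[node], repeatedly sweep the whole current reachable set adding
-- neighbours until a full pass adds nothing, return the set's size; proved equal (both compute
-- the set of nodes reachable by at least one edge).


-- ===== PORT A =====
-- graph[x] (Pre_ guarantees the key is present, so the KeyError case never happens inside Pre_)
def pvAdj (graph : List (Int × List Int)) (x : Int) : List Int :=
  ((PySem.Dict.mk graph).get? x).getD []

-- all neighbours occurring anywhere in the graph (used only to size the fuel guards)
def pvN (graph : List (Int × List Int)) : List Int := graph.flatMap (fun p => p.2)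

-- the inner 'for neighbor in graph[current]' of A, threading (visited, queue, count)
def bfsInner (visited queue : List Int) (count : Int) : List Int → List Int × List Int × Int
  | [] => (visited, queue, count)
  | nb :: rest =>
    if PySem.Set.contains visited nb then bfsInner visited queue count rest
    else bfsInner (PySem.Set.add visited nb) (queue ++ [nb]) (count + 1) rest

-- the 'while queue' loop of A; the fuel argument is a totality guard only — count_descendants
-- passes |pvN graph| + 1, which the proofs below show is never exhausted
def bfsLoop (graph : List (Int × List Int)) : Nat → List Int → List Int → Int → Int
  | 0, _, _, count => count
  | fuel + 1, visited, queue, count =>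
    match queue with
    | [] => count
    | current :: rest =>
      let r := bfsInner visited rest count (pvAdj graph current)
      bfsLoop graph fuel r.1 r.2.1 r.2.2

def count_descendants (graph : List (Int × List Int)) (node : Int) : Int :=
  bfsLoop graph ((pvN graph).length + 1) PySem.Set.empty [node] 0

-- ===== PORT B =====
-- the inner 'for nb in graph[x]' of B, threading (reachable, changed)
def satInner : List Int × Bool → List Int → List Int × Bool
  | st, [] => st
  | (reach, changed), nb :: rest =>
    if PySem.Set.contains reach nb then satInner (reach, changed) rest
    else satInner (PySem.Set.add reach nb, true) rest

-- the 'for x in list(reachable)' pass of B over the round's snapshot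
def satRound (graph : List (Int × List Int)) (st : List Int × Bool) : List Int → List Int × Bool
  | [] => st
  | x :: rest => satRound graph (satInner st (pvAdj graph x)) rest

-- the 'while changed' loop of B; the fuel argument is a totality guard only —
-- count_descendants_alt passes |pvN graph| + 1, which the proofs below show is never exhausted
def satLoop (graph : List (Int × List Int)) : Nat → List Int → List Int
  | 0, reach => reach
  | fuel + 1, reach =>
    let st := satRound graph (reach, false) reach
    if st.2 then satLoop graph fuel st.1 else st.1

def count_descendants_alt (graph : List (Int × List Int)) (node : Int) : Int :=
  PySem.Set.len (satLoop graph ((pvN graph).length + 1) (PySem.Set.ofList (pvAdj graph node)))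

-- ===== PRECONDITION & SPEC =====
-- pvReachSet graph node: the set of nodes reachable from node by at least one edge — the
-- edge-closure of graph[node]; |pvN graph| closure steps exhaust it, since every reachable node
-- lies on a duplicate-free edge path of at most |pvN graph| edges
def pvStep (graph : List (Int × List Int)) (s : List Int) : List Int :=
  PySem.Set.update s (s.flatMap (pvAdj graph))

def pvReachSet (graph : List (Int × List Int)) (node : Int) : List Int :=
  (pvStep graph)^[(pvN graph).length] (PySem.Set.ofList (pvAdj graph node))

-- Pre_ excludes (a) association lists with duplicate keys, which a Python dict cannot even
-- represent (first-vs-last match is anybody's corner), and (b) graphs in which `node` or some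
-- node reachable from it is not a key: exactly there Python's graph[current] raises KeyError.
def Pre_count_descendants (graph : List (Int × List Int)) (node : Int) : Prop :=
  (graph.map Prod.fst).Nodup ∧
  (PySem.Dict.mk graph).contains node = true ∧
  ∀ y ∈ pvReachSet graph node, (PySem.Dict.mk graph).contains y = true
instance (graph : List (Int × List Int)) (node : Int) : Decidable (Pre_count_descendants graph node) := by
  unfold Pre_count_descendants; infer_instance

def pvWitness_count_descendants : (List (Int × List Int)) × Int := ([(0, [1, 2]), (1, [0]), (2, [])], 0)

def Spec_count_descendants (graph : List (Int × List Int)) (node : Int) (out : Int) : Prop := out = count_descendants_alt graph node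
instance (graph : List (Int × List Int)) (node : Int) (out : Int) : Decidable (Spec_count_descendants graph node out) := by unfold Spec_count_descendants; infer_instance

-- ===== CLAIM (what is proved, stated in full; the proofs are below) =====
def Claim_equal_count_descendants : Prop := ∀ (graph : List (Int × List Int)) (node : Int), Dom_count_descendants graph node → Pre_count_descendants graph node → Spec_count_descendants graph node (count_descendants graph node)

-- ===== LEMMAS AND PROOFS =====

-- number of elements of pvN not yet visited (the measure showing the fuel guards are dead code)
def pvMu (graph : List (Int × List Int)) (v : List Int) : Nat :=
  ((pvN graph).filter (fun y => !(v.contains y))).length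

lemma filter_length_mono {α : Type} (l : List α) (p q : α → Bool)
    (h : ∀ x ∈ l, p x = true → q x = true) :
    (l.filter p).length ≤ (l.filter q).length := by
  induction l with
  | nil => simp
  | cons a t ih =>
    have ht : ∀ x ∈ t, p x = true → q x = true := fun x hx => h x (by simp [hx])
    have iht := ih ht
    by_cases hp : p a = true
    · have hq := h a (by simp) hp
      simp [hp, hq]; omega
    · simp only [Bool.not_eq_true] at hp
      cases hq : q a
      · simp [hp, hq]; omega
      · simp [hp, hq]; omega

lemma filter_length_lt {α : Type} (l : List α) (p q : α → Bool)
    (h : ∀ x ∈ l, p x = true → q x = true) (y : α) (hy : y ∈ l)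
    (hpy : p y = false) (hqy : q y = true) :
    (l.filter p).length < (l.filter q).length := by
  induction l with
  | nil => cases hy
  | cons a t ih =>
    have ht : ∀ x ∈ t, p x = true → q x = true := fun x hx => h x (by simp [hx])
    have hmono := filter_length_mono t p q ht
    rcases List.mem_cons.mp hy with rfl | hyt
    · simp [hpy, hqy]; omega
    · have hlt := ih ht hyt
      by_cases hp : p a = true
      · have hq := h a (by simp) hp
        simp [hp, hq]; omega
      · simp only [Bool.not_eq_true] at hp
        cases hq : q a
        · simp [hp, hq]; omega
        · simp [hp, hq]; omega

lemma pvMu_mono (graph : List (Int × List Int)) (v w : List Int)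
    (h : ∀ x ∈ v, x ∈ w) : pvMu graph w ≤ pvMu graph v := by
  apply filter_length_mono
  intro x _ hx
  simp only [Bool.not_eq_true', List.contains_eq_mem, decide_eq_false_iff_not] at *
  exact fun hxv => hx (h x hxv)

lemma pvMu_append_lt (graph : List (Int × List Int)) (v : List Int) (y : Int)
    (hyN : y ∈ pvN graph) (hyv : y ∉ v) : pvMu graph (v ++ [y]) < pvMu graph v := by
  refine filter_length_lt (pvN graph) _ _ ?_ y hyN (by simp) (by simpa using hyv)
  intro x _ hx
  simp only [Bool.not_eq_true', List.contains_eq_mem, decide_eq_false_iff_not,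
    List.mem_append, List.mem_singleton] at *
  exact fun hxv => hx (Or.inl hxv)

lemma mem_of_get?_mk (graph : List (Int × List Int)) (x : Int) (vs : List Int)
    (h : (PySem.Dict.mk graph).get? x = some vs) : (x, vs) ∈ graph := by
  induction graph with
  | nil => simp [PySem.Dict.get?] at h
  | cons p t ih =>
    rcases p with ⟨k, w⟩
    rw [PySem.Dict.get?_mk_cons] at h
    by_cases hk : (k == x) = true
    · simp only [hk, if_true, Option.some.injEq] at h
      subst h
      have : k = x := eq_of_beq hk
      subst this
      exact List.mem_cons_self
    · simp only [hk] at h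
      exact List.mem_cons_of_mem _ (ih h)

lemma pvAdj_subset_pvN (graph : List (Int × List Int)) (x : Int) :
    ∀ y ∈ pvAdj graph x, y ∈ pvN graph := by
  intro y hy
  unfold pvAdj at hy
  cases hget : (PySem.Dict.mk graph).get? x with
  | none => rw [hget] at hy; simp at hy
  | some vs =>
    rw [hget] at hy
    simp only [Option.getD_some] at hy
    exact List.mem_flatMap.mpr ⟨(x, vs), mem_of_get?_mk graph x vs hget, hy⟩

-- everything bfsInner does, bundled
lemma bfsInner_bundle (nbs : List Int) : ∀ (v q : List Int) (c : Int),
    ∃ fresh : List Int,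
      bfsInner v q c nbs = (v ++ fresh, q ++ fresh, c + fresh.length) ∧
      fresh.Nodup ∧ (∀ y ∈ fresh, y ∈ nbs ∧ y ∉ v) ∧ (∀ y ∈ nbs, y ∈ v ++ fresh) := by
  induction nbs with
  | nil => intro v q c; exact ⟨[], by simp [bfsInner], by simp, by simp, by simp⟩
  | cons nb rest ih =>
    intro v q c
    by_cases hmem : nb ∈ v
    · obtain ⟨fresh, heq, hnd, hf, hcov⟩ := ih v q c
      refine ⟨fresh, ?_, hnd, ?_, ?_⟩
      · simp only [bfsInner, PySem.Set.contains, List.contains_eq_mem, hmem, decide_true, if_true]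
        exact heq
      · exact fun y hy => ⟨List.mem_cons_of_mem _ (hf y hy).1, (hf y hy).2⟩
      · intro y hy
        rcases List.mem_cons.mp hy with rfl | hy
        · simp [hmem]
        · exact hcov y hy
    · obtain ⟨fresh, heq, hnd, hf, hcov⟩ := ih (v ++ [nb]) (q ++ [nb]) (c + 1)
      refine ⟨nb :: fresh, ?_, ?_, ?_, ?_⟩
      · have hc : PySem.Set.contains v nb = false := by
          simp [PySem.Set.contains, hmem]
        simp only [bfsInner, hc, Bool.false_eq_true, if_false, PySem.Set.add_of_not_mem hmem]
        rw [heq]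
        simp only [List.append_assoc, List.singleton_append, List.length_cons, Prod.mk.injEq]
        refine ⟨by simp, by simp, by push_cast; ring⟩
      · refine List.nodup_cons.mpr ⟨fun hnb => ?_, hnd⟩
        exact (hf nb hnb).2 (by simp)
      · intro y hy
        rcases List.mem_cons.mp hy with rfl | hy
        · exact ⟨by simp, hmem⟩
        · refine ⟨List.mem_cons_of_mem _ (hf y hy).1, fun hyv => (hf y hy).2 (by simp [hyv])⟩
      · intro y hy
        rcases List.mem_cons.mp hy with rfl | hy
        · simp
        · have := hcov y hy
          simp only [List.mem_append, List.mem_cons] at this ⊢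
          tauto

-- measure consequence of the bundle
lemma bfsInner_measure (graph : List (Int × List Int)) (nbs v q : List Int) (c : Int)
    (hN : ∀ y ∈ nbs, y ∈ pvN graph) :
    pvMu graph (bfsInner v q c nbs).1 + (bfsInner v q c nbs).2.1.length ≤
      pvMu graph v + q.length := by
  obtain ⟨fresh, heq, hnd, hf, _⟩ := bfsInner_bundle nbs v q c
  rw [heq]
  simp only [List.length_append]
  have key : ∀ fr (w : List Int), fr.Nodup → (∀ y ∈ fr, y ∈ pvN graph ∧ y ∉ w) →
      pvMu graph (w ++ fr) + fr.length ≤ pvMu graph w := by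
    intro fr
    induction fr with
    | nil => intro w _ _; simp
    | cons a t ihf =>
      intro w hnd hin
      have h1 : pvMu graph (w ++ [a]) < pvMu graph w :=
        pvMu_append_lt graph w a (hin a (by simp)).1 (hin a (by simp)).2
      have h2 : pvMu graph ((w ++ [a]) ++ t) + t.length ≤ pvMu graph (w ++ [a]) := by
        apply ihf (w ++ [a]) (List.nodup_cons.mp hnd).2
        intro y hy
        refine ⟨(hin y (by simp [hy])).1, ?_⟩
        simp only [List.mem_append, List.mem_singleton]
        rintro (hyw | rfl)
        · exact (hin y (by simp [hy])).2 hyw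
        · exact (List.nodup_cons.mp hnd).1 hy
      rw [show w ++ a :: t = (w ++ [a]) ++ t by simp]
      simp only [List.length_cons]
      omega
  have := key fresh v hnd (fun y hy => ⟨hN y (hf y hy).1, (hf y hy).2⟩)
  omega

-- the visited/queue components of bfsInner do not depend on the counter
lemma bfsInner_comp (nbs : List Int) : ∀ (v q : List Int) (c c' : Int),
    (bfsInner v q c nbs).1 = (bfsInner v q c' nbs).1 ∧
    (bfsInner v q c nbs).2.1 = (bfsInner v q c' nbs).2.1 := by
  induction nbs with
  | nil => intro v q c c'; simp [bfsInner]
  | cons nb rest ih =>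
    intro v q c c'
    by_cases hmem : nb ∈ v
    · simpa [bfsInner, PySem.Set.contains, hmem] using ih v q c c'
    · simpa [bfsInner, PySem.Set.contains, hmem] using ih (PySem.Set.add v nb) (q ++ [nb]) (c + 1) (c' + 1)

-- edge relation and reachability (path of length ≥ 1), used only in the proofs
def pvE (graph : List (Int × List Int)) (a b : Int) : Prop := b ∈ pvAdj graph a

def pvReach (graph : List (Int × List Int)) (node y : Int) : Prop :=
  Relation.TransGen (pvE graph) node y

-- ghost version of bfsLoop returning the visited list instead of the counter
def bfsV (graph : List (Int × List Int)) : Nat → List Int → List Int → List Int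
  | 0, visited, _ => visited
  | fuel + 1, visited, queue =>
    match queue with
    | [] => visited
    | current :: rest =>
      let r := bfsInner visited rest 0 (pvAdj graph current)
      bfsV graph fuel r.1 r.2.1

-- A's counter equals the growth of the (ghost) visited list (fuel never exhausts under the bound)
lemma bfsLoop_eq_bfsV (graph : List (Int × List Int)) : ∀ (fuel : Nat) (visited queue : List Int)
    (count : Int), pvMu graph visited + queue.length ≤ fuel →
    bfsLoop graph fuel visited queue count =
      count + ((bfsV graph fuel visited queue).length : Int) - (visited.length : Int) := by
  intro fuel
  induction fuel with
  | zero => intro v q c _; simp [bfsLoop, bfsV]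
  | succ fuel ih =>
    intro v q c hfuel
    cases q with
    | nil => simp [bfsLoop, bfsV]
    | cons cur rest =>
      obtain ⟨fresh, heq, -, -, -⟩ := bfsInner_bundle (pvAdj graph cur) v rest c
      obtain ⟨fresh0, heq0, -, -, -⟩ := bfsInner_bundle (pvAdj graph cur) v rest 0
      have hff : fresh0 = fresh := by
        have h1 := (bfsInner_comp (pvAdj graph cur) v rest 0 c).1
        rw [heq, heq0] at h1
        exact List.append_cancel_left h1
      have hm := bfsInner_measure graph (pvAdj graph cur) v rest c
        (pvAdj_subset_pvN graph cur)
      rw [heq] at hm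
      simp only [List.length_cons] at hfuel
      have hrec : pvMu graph (v ++ fresh) + (rest ++ fresh).length ≤ fuel := by
        simp only at hm
        omega
      have := ih (v ++ fresh) (rest ++ fresh) (c + (fresh.length : Int)) hrec
      simp only [bfsLoop, bfsV, heq, heq0, hff, this]
      simp only [List.length_append]
      push_cast; ring

-- reachability is contained in any set closed under successors of node and of itself
lemma reach_subset (graph : List (Int × List Int)) (node : Int) (V : List Int)
    (hclosed : ∀ y, (y = node ∨ y ∈ V) → ∀ z ∈ pvAdj graph y, z ∈ V) :
    ∀ y, pvReach graph node y → y ∈ V := by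
  intro y h
  induction h with
  | single hz => exact hclosed node (Or.inl rfl) _ hz
  | tail _ h2 ih => exact hclosed _ (Or.inr ih) _ h2

-- the BFS invariants: the final visited list is duplicate-free, sound and successor-closed
lemma bfsV_main (graph : List (Int × List Int)) (node : Int) : ∀ (fuel : Nat) (v q : List Int),
    pvMu graph v + q.length ≤ fuel →
    v.Nodup →
    (∀ y ∈ v, pvReach graph node y) →
    (∀ y ∈ q, y = node ∨ pvReach graph node y) →
    (∀ y, (y = node ∨ y ∈ v) → y ∈ q ∨ (∀ z ∈ pvAdj graph y, z ∈ v)) →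
    (∀ x ∈ v, x ∈ bfsV graph fuel v q) ∧ (bfsV graph fuel v q).Nodup ∧
    (∀ y ∈ bfsV graph fuel v q, pvReach graph node y) ∧
    (∀ y, (y = node ∨ y ∈ bfsV graph fuel v q) → ∀ z ∈ pvAdj graph y, z ∈ bfsV graph fuel v q) := by
  intro fuel
  induction fuel with
  | zero =>
    intro v q hfuel hnd hsound _ hclosed
    have hq : q = [] := by
      cases q with
      | nil => rfl
      | cons a t => simp at hfuel
    subst hq
    simp only [bfsV]
    refine ⟨fun x hx => hx, hnd, hsound, fun y hy z hz => ?_⟩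
    rcases hclosed y hy with hq | hcl
    · cases hq
    · exact hcl z hz
  | succ fuel ih =>
    intro v q hfuel hnd hsound hq hclosed
    cases q with
    | nil =>
      simp only [bfsV]
      refine ⟨fun x hx => hx, hnd, hsound, fun y hy z hz => ?_⟩
      rcases hclosed y hy with hq' | hcl
      · cases hq'
      · exact hcl z hz
    | cons cur rest =>
      obtain ⟨fresh, heq, hfnd, hf, hcov⟩ := bfsInner_bundle (pvAdj graph cur) v rest 0
      have hcur : cur = node ∨ pvReach graph node cur := hq cur (by simp)
      have hfreach : ∀ y ∈ fresh, pvReach graph node y := by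
        intro y hy
        have hyadj : y ∈ pvAdj graph cur := (hf y hy).1
        rcases hcur with rfl | hcur
        · exact Relation.TransGen.single hyadj
        · exact Relation.TransGen.tail hcur hyadj
      have h1 : (v ++ fresh).Nodup := by
        rw [List.nodup_append]
        exact ⟨hnd, hfnd, fun a ha b hb hab => (hf b hb).2 (hab ▸ ha)⟩
      have h2 : ∀ y ∈ v ++ fresh, pvReach graph node y := by
        intro y hy
        rcases List.mem_append.mp hy with hy | hy
        · exact hsound y hy
        · exact hfreach y hy
      have h3 : ∀ y ∈ rest ++ fresh, y = node ∨ pvReach graph node y := by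
        intro y hy
        rcases List.mem_append.mp hy with hy | hy
        · exact hq y (by simp [hy])
        · exact Or.inr (hfreach y hy)
      have h4 : ∀ y, (y = node ∨ y ∈ v ++ fresh) →
          y ∈ rest ++ fresh ∨ (∀ z ∈ pvAdj graph y, z ∈ v ++ fresh) := by
        intro y hy
        by_cases hyf : y ∈ fresh
        · exact Or.inl (List.mem_append.mpr (Or.inr hyf))
        · have hy0 : y = node ∨ y ∈ v := by
            rcases hy with rfl | hy
            · exact Or.inl rfl
            · rcases List.mem_append.mp hy with hy | hy
              · exact Or.inr hy
              · exact absurd hy hyf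
          rcases hclosed y hy0 with hyq | hcl
          · rcases List.mem_cons.mp hyq with rfl | hyr
            · exact Or.inr (fun z hz => hcov z hz)
            · exact Or.inl (List.mem_append.mpr (Or.inl hyr))
          · exact Or.inr (fun z hz => List.mem_append.mpr (Or.inl (hcl z hz)))
      have hm := bfsInner_measure graph (pvAdj graph cur) v rest 0
        (pvAdj_subset_pvN graph cur)
      rw [heq] at hm
      simp only [List.length_cons] at hfuel
      have hrec : pvMu graph (v ++ fresh) + (rest ++ fresh).length ≤ fuel := by
        simp only at hm
        omega
      have hcon := ih (v ++ fresh) (rest ++ fresh) hrec h1 h2 h3 h4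
      have hunfold : bfsV graph (fuel + 1) v (cur :: rest) =
          bfsV graph fuel (v ++ fresh) (rest ++ fresh) := by
        simp only [bfsV, heq]
      rw [hunfold]
      exact ⟨fun x hx => hcon.1 x (by simp [hx]), hcon.2.1, hcon.2.2.1, hcon.2.2.2⟩

-- everything satInner does, bundled: it appends the fresh neighbours and ors the changed flag
lemma satInner_bundle (nbs : List Int) : ∀ (r : List Int) (ch : Bool),
    ∃ fresh : List Int,
      satInner (r, ch) nbs = (r ++ fresh, ch || !fresh.isEmpty) ∧
      fresh.Nodup ∧ (∀ y ∈ fresh, y ∈ nbs ∧ y ∉ r) ∧ (∀ y ∈ nbs, y ∈ r ++ fresh) := by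
  induction nbs with
  | nil => intro r ch; exact ⟨[], by simp [satInner], by simp, by simp, by simp⟩
  | cons nb rest ih =>
    intro r ch
    by_cases hmem : nb ∈ r
    · obtain ⟨fresh, heq, hnd, hf, hcov⟩ := ih r ch
      refine ⟨fresh, ?_, hnd, ?_, ?_⟩
      · simp only [satInner, PySem.Set.contains, List.contains_eq_mem, hmem, decide_true, if_true]
        exact heq
      · exact fun y hy => ⟨List.mem_cons_of_mem _ (hf y hy).1, (hf y hy).2⟩
      · intro y hy
        rcases List.mem_cons.mp hy with rfl | hy
        · simp [hmem]
        · exact hcov y hy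
    · obtain ⟨fresh, heq, hnd, hf, hcov⟩ := ih (r ++ [nb]) true
      refine ⟨nb :: fresh, ?_, ?_, ?_, ?_⟩
      · have hc : PySem.Set.contains r nb = false := by
          simp [PySem.Set.contains, hmem]
        simp only [satInner, hc, Bool.false_eq_true, if_false, PySem.Set.add_of_not_mem hmem]
        rw [heq]
        simp
      · refine List.nodup_cons.mpr ⟨fun hnb => ?_, hnd⟩
        exact (hf nb hnb).2 (by simp)
      · intro y hy
        rcases List.mem_cons.mp hy with rfl | hy
        · exact ⟨by simp, hmem⟩
        · refine ⟨List.mem_cons_of_mem _ (hf y hy).1, fun hyv => (hf y hy).2 (by simp [hyv])⟩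
      · intro y hy
        rcases List.mem_cons.mp hy with rfl | hy
        · simp
        · have := hcov y hy
          simp only [List.mem_append, List.mem_cons] at this ⊢
          tauto

-- boolean bookkeeping for the changed flag across one sweep
lemma changed_flag_append (ch : Bool) (f1 f2 : List Int) :
    (ch || !f1.isEmpty || !f2.isEmpty) = (ch || !(f1 ++ f2).isEmpty) := by
  cases f1 <;> cases ch <;> simp

-- everything one full sweep (satRound) does, bundled
lemma satRound_bundle (graph : List (Int × List Int)) (snap : List Int) :
    ∀ (r : List Int) (ch : Bool),
    ∃ fresh : List Int,
      satRound graph (r, ch) snap = (r ++ fresh, ch || !fresh.isEmpty) ∧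
      fresh.Nodup ∧
      (∀ y ∈ fresh, (∃ x ∈ snap, y ∈ pvAdj graph x) ∧ y ∉ r) ∧
      (∀ x ∈ snap, ∀ z ∈ pvAdj graph x, z ∈ r ++ fresh) := by
  induction snap with
  | nil => intro r ch; exact ⟨[], by simp [satRound], by simp, by simp, by simp⟩
  | cons x rest ih =>
    intro r ch
    obtain ⟨f1, heq1, hnd1, hf1, hcov1⟩ := satInner_bundle (pvAdj graph x) r ch
    obtain ⟨f2, heq2, hnd2, hf2, hcov2⟩ := ih (r ++ f1) (ch || !f1.isEmpty)
    refine ⟨f1 ++ f2, ?_, ?_, ?_, ?_⟩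
    · simp only [satRound, heq1, heq2, List.append_assoc, Prod.mk.injEq, true_and]
      exact changed_flag_append ch f1 f2
    · rw [List.nodup_append]
      exact ⟨hnd1, hnd2, fun a ha b hb hab => (hf2 b hb).2 (by simp [hab ▸ ha])⟩
    · intro y hy
      rcases List.mem_append.mp hy with hy | hy
      · exact ⟨⟨x, by simp, (hf1 y hy).1⟩, (hf1 y hy).2⟩
      · obtain ⟨⟨x', hx', hadj⟩, hnr⟩ := hf2 y hy
        exact ⟨⟨x', by simp [hx'], hadj⟩, fun hyr => hnr (by simp [hyr])⟩
    · intro x' hx' z hz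
      rcases List.mem_cons.mp hx' with rfl | hx'
      · have := hcov1 z hz
        simp only [List.mem_append] at this ⊢
        tauto
      · have := hcov2 x' hx' z hz
        simp only [List.mem_append] at this ⊢
        tauto

-- the saturation invariants: the final reachable list is duplicate-free, sound and closed
-- under successors of its own members (node-closure comes from graph[node] ⊆ the start set)
lemma satLoop_main (graph : List (Int × List Int)) (node : Int) : ∀ (fuel : Nat) (r : List Int),
    pvMu graph r + 1 ≤ fuel →
    r.Nodup →
    (∀ y ∈ r, pvReach graph node y) →
    (∀ x ∈ r, x ∈ satLoop graph fuel r) ∧ (satLoop graph fuel r).Nodup ∧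
    (∀ y ∈ satLoop graph fuel r, pvReach graph node y) ∧
    (∀ x ∈ satLoop graph fuel r, ∀ z ∈ pvAdj graph x, z ∈ satLoop graph fuel r) := by
  intro fuel
  induction fuel with
  | zero => intro r hfuel _ _; omega
  | succ fuel ih =>
    intro r hfuel hnd hsound
    obtain ⟨fresh, heq, hfnd, hf, hcov⟩ := satRound_bundle graph r r false
    by_cases hfe : fresh = []
    · subst hfe
      have hret : satLoop graph (fuel + 1) r = r := by
        simp only [satLoop, heq, List.isEmpty_nil, Bool.not_true, Bool.false_or,
          Bool.false_eq_true, if_false, List.append_nil]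
      rw [hret]
      refine ⟨fun x hx => hx, hnd, hsound, fun x hx z hz => ?_⟩
      have := hcov x hx z hz
      simpa using this
    · obtain ⟨a, t, hat⟩ := List.exists_cons_of_ne_nil hfe
      subst hat
      have hfa : a ∈ a :: t := by simp
      have hsoundf : ∀ y ∈ a :: t, pvReach graph node y := by
        intro y hy
        obtain ⟨⟨x, hx, hadj⟩, _⟩ := hf y hy
        exact Relation.TransGen.tail (hsound x hx) hadj
      have hfreshN : ∀ y ∈ a :: t, y ∈ pvN graph := by
        intro y hy
        obtain ⟨⟨x, _, hadj⟩, _⟩ := hf y hy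
        exact pvAdj_subset_pvN graph x y hadj
      have hmu1 : pvMu graph (r ++ [a]) < pvMu graph r :=
        pvMu_append_lt graph r a (hfreshN a hfa) (hf a hfa).2
      have hmu2 : pvMu graph (r ++ a :: t) ≤ pvMu graph (r ++ [a]) := by
        apply pvMu_mono
        intro x hx
        rcases List.mem_append.mp hx with hx | hx
        · simp [hx]
        · rw [List.mem_singleton] at hx; simp [hx, hfa]
      have hnd' : (r ++ a :: t).Nodup := by
        rw [List.nodup_append]
        exact ⟨hnd, hfnd, fun a' ha' b hb hab => (hf b hb).2 (hab ▸ ha')⟩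
      have hsound' : ∀ y ∈ r ++ a :: t, pvReach graph node y := by
        intro y hy
        rcases List.mem_append.mp hy with hy | hy
        · exact hsound y hy
        · exact hsoundf y hy
      have hcon := ih (r ++ a :: t) (by omega) hnd' hsound'
      have hrun : satLoop graph (fuel + 1) r = satLoop graph fuel (r ++ a :: t) := by
        simp only [satLoop, heq, List.isEmpty_cons, Bool.not_false, Bool.false_or, if_true]
      rw [hrun]
      exact ⟨fun x hx => hcon.1 x (by simp [hx]), hcon.2.1, hcon.2.2.1, hcon.2.2.2⟩

-- ===== VERDICT (by name: the statement is the Claim_ definition above) =====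
theorem count_descendants_spec : Claim_equal_count_descendants := by
  intro graph node _ _
  unfold Spec_count_descendants count_descendants count_descendants_alt
  have hone : ([node] : List Int).length = 1 := rfl
  have hAmain := bfsV_main graph node ((pvN graph).length + 1) PySem.Set.empty [node]
    (by
      have : pvMu graph PySem.Set.empty ≤ (pvN graph).length := List.length_filter_le _ _
      rw [hone]; omega)
    (by simp [PySem.Set.empty]) (by simp [PySem.Set.empty])
    (by intro y hy; rw [List.mem_singleton] at hy; exact Or.inl hy)
    (by
      intro y hy
      rcases hy with rfl | hy
      · exact Or.inl (by simp)
      · simp [PySem.Set.empty] at hy)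
  have hr0nd : (PySem.Set.ofList (pvAdj graph node) : List Int).Nodup := PySem.Set.nodup_ofList _
  have hr0mem : ∀ y, y ∈ (PySem.Set.ofList (pvAdj graph node) : List Int) ↔
      y ∈ pvAdj graph node := fun y => PySem.Set.mem_ofList _ _
  have hBmain := satLoop_main graph node ((pvN graph).length + 1)
    (PySem.Set.ofList (pvAdj graph node))
    (by
      have : pvMu graph (PySem.Set.ofList (pvAdj graph node)) ≤ (pvN graph).length :=
        List.length_filter_le _ _
      omega)
    hr0nd
    (by
      intro y hy
      exact Relation.TransGen.single ((hr0mem y).mp hy))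
  have hclosedB : ∀ y, (y = node ∨ y ∈ satLoop graph ((pvN graph).length + 1)
      (PySem.Set.ofList (pvAdj graph node))) → ∀ z ∈ pvAdj graph y,
      z ∈ satLoop graph ((pvN graph).length + 1) (PySem.Set.ofList (pvAdj graph node)) := by
    intro y hy z hz
    rcases hy with rfl | hy
    · exact hBmain.1 z ((hr0mem z).mpr hz)
    · exact hBmain.2.2.2 y hy z hz
  have hmemA : ∀ y, y ∈ bfsV graph ((pvN graph).length + 1) PySem.Set.empty [node] ↔
      pvReach graph node y := fun y =>
    ⟨hAmain.2.2.1 y, fun h => reach_subset graph node _ hAmain.2.2.2 y h⟩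
  have hmemB : ∀ y, y ∈ satLoop graph ((pvN graph).length + 1)
      (PySem.Set.ofList (pvAdj graph node)) ↔ pvReach graph node y := fun y =>
    ⟨hBmain.2.2.1 y, fun h => reach_subset graph node _ hclosedB y h⟩
  have hperm : (bfsV graph ((pvN graph).length + 1) PySem.Set.empty [node]).Perm
      (satLoop graph ((pvN graph).length + 1) (PySem.Set.ofList (pvAdj graph node))) :=
    (List.perm_ext_iff_of_nodup hAmain.2.1 hBmain.2.1).mpr
      (fun y => (hmemA y).trans (hmemB y).symm)
  have hlen := hperm.length_eq
  rw [bfsLoop_eq_bfsV graph ((pvN graph).length + 1) PySem.Set.empty [node] 0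
    (by
      have : pvMu graph PySem.Set.empty ≤ (pvN graph).length := List.length_filter_le _ _
      rw [hone]; omega)]
  simp only [PySem.Set.len, PySem.Set.empty, List.length_nil] at hlen ⊢
  omega
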